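-- pv_equiv track=rewrite | github.com/frazier-at-cpcc/cisco-brightspace | app.py | find_brightspace_column
-- ===== SOURCE A (Python) =====
-- from typing import Dict, List, Tuple, Optional, Set
--
-- def find_brightspace_column(brightspace_columns: List[str], search_term: str) -> Optional[str]:
--     """Find the best matching Brightspace column for a given search term."""
--     # First try exact match
--     for col in brightspace_columns:
--         if search_term in col:
--             return col
--
--     # Try partial matches with key terms
--     key_terms = search_term.lower().split()
--     for col in brightspace_columns:
--         col_lower = col.lower()
--         if any(term in col_lower for term in key_terms):
--             return col
--
--     return None
-- ===== SOURCE B (Python) =====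
-- from typing import List, Optional
--
-- def find_brightspace_column(brightspace_columns: List[str], search_term: str) -> Optional[str]:
--     """Single pass: exact (case-sensitive) hit returns immediately; the first
--     case-insensitive key-term hit is remembered as a fallback returned at the end."""
--     key_terms = search_term.lower().split()
--     fallback = None
--     for col in brightspace_columns:
--         if search_term in col:
--             return col
--         if fallback is None and any(term in col.lower() for term in key_terms):
--             fallback = col
--     return fallback
-- ===== Notes on version B (the rewrite author's own statement) =====
-- stated objective: alternative
-- what changed: Replaces A's two sequential scans (exact pass, then partial pass) with one pass that returns eagerly on an exact match and remembers the first key-term match as a fallback.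
import Mathlib
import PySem

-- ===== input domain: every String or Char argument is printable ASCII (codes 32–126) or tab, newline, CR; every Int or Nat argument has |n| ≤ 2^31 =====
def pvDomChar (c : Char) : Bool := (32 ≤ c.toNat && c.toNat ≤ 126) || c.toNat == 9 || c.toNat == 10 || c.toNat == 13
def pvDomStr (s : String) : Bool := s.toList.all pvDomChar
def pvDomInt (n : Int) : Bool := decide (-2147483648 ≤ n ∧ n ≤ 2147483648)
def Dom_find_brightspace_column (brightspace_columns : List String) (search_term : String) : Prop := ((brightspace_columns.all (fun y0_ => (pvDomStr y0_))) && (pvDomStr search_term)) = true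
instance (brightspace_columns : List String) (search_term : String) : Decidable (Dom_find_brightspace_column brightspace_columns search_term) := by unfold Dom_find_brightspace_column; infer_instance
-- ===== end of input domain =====

-- B replaces A's two sequential scans by one pass with an eager exact return and a first-partial-match fallback (alternative decomposition, same cost).


-- ===== PORT A =====
-- A: first scan for an exact (case-sensitive substring) match, then a second scan
-- for any lowercased key term of the search term.
def find_brightspace_column (brightspace_columns : List String) (search_term : String) : Option String :=
  match brightspace_columns.find? (fun col => PySem.Str.isIn search_term col) with
  | some col => some col
  | none =>
    let key_terms := PySem.Str.split₀ (PySem.Str.lower search_term)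
    brightspace_columns.find? (fun col =>
      key_terms.any (fun term => PySem.Str.isIn term (PySem.Str.lower col)))

-- ===== PORT B =====
-- B: single pass; exact match returns eagerly, first key-term match is kept as fallback.
def find_brightspace_column_alt_go (search_term : String) (key_terms : List String)
    (fallback : Option String) : List String → Option String
  | [] => fallback
  | col :: rest =>
    if PySem.Str.isIn search_term col then some col
    else
      find_brightspace_column_alt_go search_term key_terms
        (if fallback.isNone && key_terms.any (fun term => PySem.Str.isIn term (PySem.Str.lower col))
         then some col else fallback) rest

def find_brightspace_column_alt (brightspace_columns : List String) (search_term : String) : Option String :=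
  find_brightspace_column_alt_go search_term (PySem.Str.split₀ (PySem.Str.lower search_term))
    none brightspace_columns

-- ===== PRECONDITION & SPEC =====
def Spec_find_brightspace_column (brightspace_columns : List String) (search_term : String) (out : Option String) : Prop := out = find_brightspace_column_alt brightspace_columns search_term
instance (brightspace_columns : List String) (search_term : String) (out : Option String) : Decidable (Spec_find_brightspace_column brightspace_columns search_term out) := by unfold Spec_find_brightspace_column; infer_instance

-- ===== CLAIM (what is proved, stated in full; the proofs are below) =====
def Claim_equal_find_brightspace_column : Prop := ∀ (brightspace_columns : List String) (search_term : String), Dom_find_brightspace_column brightspace_columns search_term → Spec_find_brightspace_column brightspace_columns search_term (find_brightspace_column brightspace_columns search_term)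

-- ===== LEMMAS AND PROOFS =====
-- Loop invariant for B's single pass: it equals "first exact match, else
-- fallback if already set, else first partial match".
theorem alt_go_eq (search_term : String) (key_terms : List String)
    (cols : List String) (fb : Option String) :
    find_brightspace_column_alt_go search_term key_terms fb cols =
      match cols.find? (fun col => PySem.Str.isIn search_term col) with
      | some col => some col
      | none =>
        match fb with
        | some x => some x
        | none => cols.find? (fun col =>
            key_terms.any (fun term => PySem.Str.isIn term (PySem.Str.lower col))) := by
  induction cols generalizing fb with
  | nil => cases fb <;> simp [find_brightspace_column_alt_go]
  | cons c rest ih =>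
    show (if PySem.Str.isIn search_term c = true then some c else _) = _
    by_cases hE : PySem.Str.isIn search_term c = true
    · rw [if_pos hE, List.find?_cons_of_pos hE]
    · rw [if_neg hE, List.find?_cons_of_neg (by simpa using hE), ih]
      cases fb with
      | some x => simp
      | none =>
        simp only [Option.isNone_none, Bool.true_and]
        by_cases hP : (key_terms.any fun term => PySem.Str.isIn term (PySem.Str.lower c)) = true
        · rw [if_pos hP,
            List.find?_cons_of_pos (p := fun col => key_terms.any fun term => PySem.Str.isIn term (PySem.Str.lower col)) hP]
        · rw [if_neg hP, List.find?_cons_of_neg (p := fun col => key_terms.any fun term => PySem.Str.isIn term (PySem.Str.lower col)) (by simpa using hP)]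

-- ===== VERDICT (by name: the statement is the Claim_ definition above) =====
theorem find_brightspace_column_spec : Claim_equal_find_brightspace_column := by
  intro cols term _
  unfold Spec_find_brightspace_column find_brightspace_column find_brightspace_column_alt
  rw [alt_go_eq]
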